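-- pv_equiv track=rewrite | github.com/choyeongwook/Algorithm | Programmers/Lv2/주식가격.py | solution
-- ===== SOURCE A (Python) =====
-- def solution(prices):
--     stack = []
--     answer = [i for i in range(len(prices)-1, -1, -1)]
--
--     for i in range(len(prices)):
--         while stack and prices[stack[-1]] > prices[i]:
--             prev_index = stack.pop()
--             answer[prev_index] = i-prev_index
--
--         stack.append(i)
--
--     return answer
-- ===== SOURCE B (Python) =====
-- def solution(prices):
--     # Naive forward scan over suffixes: for each price, count steps until a strictly smaller price (inclusive).
--     answer = []
--     rest = prices
--     while rest:
--         p = rest[0]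
--         rest = rest[1:]
--         cnt = 0
--         for q in rest:
--             cnt += 1
--             if q < p:
--                 break
--         answer.append(cnt)
--     return answer
-- ===== Notes on version B (the rewrite author's own statement) =====
-- stated objective: simpler
-- what changed: Replaced A's monotonic-stack single pass (with an answer array pre-filled and overwritten on pops) by the naive per-element forward scan that counts steps until the first strictly smaller price, built structurally over the list's suffixes.
import Mathlib
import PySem

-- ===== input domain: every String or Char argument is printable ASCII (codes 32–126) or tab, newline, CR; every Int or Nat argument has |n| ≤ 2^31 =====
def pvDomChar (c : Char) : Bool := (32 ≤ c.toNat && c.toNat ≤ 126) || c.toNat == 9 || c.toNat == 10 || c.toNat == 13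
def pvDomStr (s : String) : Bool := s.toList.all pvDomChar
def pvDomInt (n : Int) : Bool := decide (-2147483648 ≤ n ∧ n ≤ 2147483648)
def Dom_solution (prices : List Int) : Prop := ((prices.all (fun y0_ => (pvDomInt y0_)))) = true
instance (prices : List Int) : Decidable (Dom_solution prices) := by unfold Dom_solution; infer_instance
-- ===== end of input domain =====

-- B replaces A's monotonic-stack single pass by the naive per-element forward scan
-- (count steps until a strictly smaller price); objective: simpler, not faster.

-- ===== PORT A =====
-- inner `while stack and prices[stack[-1]] > prices[i]` loop; stack head = Python's stack[-1]
-- (indices pushed on the stack and `i` are always in range, so the total pyGetD/pySetD are exact here)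
def solutionPop (prices : List Int) (i : Int) : List Int → List Int → List Int × List Int
  | [], answer => ([], answer)
  | top :: rest, answer =>
    if PySem.List.pyGetD prices top 0 > PySem.List.pyGetD prices i 0 then
      -- prev_index = stack.pop(); answer[prev_index] = i - prev_index
      solutionPop prices i rest (PySem.List.pySetD answer top (i - top))
    else (top :: rest, answer)

def solution (prices : List Int) : List Int :=
  -- answer = [i for i in range(len(prices)-1, -1, -1)]
  let answer := PySem.List.pyRange (PySem.List.len prices - 1) (-1) (-1)
  -- for i in range(len(prices)): …; stack.append(i)
  ((PySem.List.pyRange 0 (PySem.List.len prices) 1).foldl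
      (fun (st : List Int × List Int) (i : Int) =>
        let r := solutionPop prices i st.1 st.2
        (i :: r.1, r.2))
      (([] : List Int), answer)).2

-- ===== PORT B =====
-- inner `for q in rest: cnt += 1; if q < p: break`
def altCount (p : Int) : List Int → Int
  | [] => 0
  | q :: qs => if q < p then 1 else 1 + altCount p qs

-- outer `while rest:` loop, structurally recursive over the suffixes
def solution_alt : List Int → List Int
  | [] => []
  | p :: rest => altCount p rest :: solution_alt rest

-- ===== PRECONDITION & SPEC =====
def Spec_solution (prices : List Int) (out : List Int) : Prop := out = solution_alt prices
instance (prices : List Int) (out : List Int) : Decidable (Spec_solution prices out) := by unfold Spec_solution; infer_instance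

-- ===== CLAIM (what is proved, stated in full; the proofs are below) =====
def Claim_equal_solution : Prop := ∀ (prices : List Int), Dom_solution prices → Spec_solution prices (solution prices)

-- ===== LEMMAS AND PROOFS =====

-- k "survives" the first i steps: no strictly smaller price at an index j with k < j < i
def gud (prices : List Int) (i k : Nat) : Bool :=
  decide (∀ j < i, k < j → prices[k]?.getD 0 ≤ prices[j]?.getD 0)

-- the stack A holds before step i (head = top = largest index)
def cstack (prices : List Int) (i : Nat) : List Nat :=
  ((List.range i).filter (gud prices i)).reverse

-- B's value at index k
def tgt (prices : List Int) (k : Nat) : Int :=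
  altCount (prices[k]?.getD 0) (prices.drop (k + 1))

-- A's answer array before step i
def cans (prices : List Int) (i : Nat) : List Int :=
  (List.range prices.length).map
    (fun k => if gud prices i k then (prices.length : Int) - 1 - k else tgt prices k)

lemma gud_of_le (prices : List Int) {i k : Nat} (h : i ≤ k + 1) : gud prices i k = true := by
  simp only [gud, decide_eq_true_eq]
  intro j hj hkj; omega

lemma gud_succ_iff (prices : List Int) (i k : Nat) :
    gud prices (i + 1) k = true ↔
      gud prices i k = true ∧ (k < i → prices[k]?.getD 0 ≤ prices[i]?.getD 0) := by
  simp only [gud, decide_eq_true_eq]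
  constructor
  · intro h
    exact ⟨fun j hj hkj => h j (by omega) hkj, fun hk => h i (by omega) hk⟩
  · rintro ⟨h1, h2⟩ j hj hkj
    rcases Nat.lt_succ_iff_lt_or_eq.mp hj with hj' | rfl
    · exact h1 j hj' hkj
    · exact h2 hkj

lemma altCount_all (p : Int) (l : List Int) (h : ∀ q ∈ l, p ≤ q) :
    altCount p l = (l.length : Int) := by
  induction l with
  | nil => simp [altCount]
  | cons q qs ih =>
    have hq := h q (by simp)
    simp only [altCount, if_neg (by omega : ¬ q < p)]
    rw [ih (fun r hr => h r (by simp [hr]))]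
    simp; omega

lemma altCount_drop_all (prices : List Int) (p : Int) (s : Nat)
    (hge : ∀ j, s ≤ j → j < prices.length → p ≤ prices[j]?.getD 0) :
    altCount p (prices.drop s) = ((prices.length - s : Nat) : Int) := by
  rw [altCount_all]
  · simp
  · intro q hq
    rw [List.mem_iff_getElem] at hq
    obtain ⟨t, ht, rfl⟩ := hq
    have hlen : t < prices.length - s := by simpa using ht
    have := hge (s + t) (by omega) (by omega)
    rw [List.getElem_drop]
    rw [List.getElem?_eq_getElem (by omega : s + t < prices.length)] at this
    simpa using this

lemma altCount_drop_first (prices : List Int) (p : Int) :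
    ∀ (d s m : Nat), m - s = d → s ≤ m → m < prices.length →
    (∀ j, s ≤ j → j < m → p ≤ prices[j]?.getD 0) →
    prices[m]?.getD 0 < p →
    altCount p (prices.drop s) = (m : Int) - s + 1 := by
  intro d
  induction d with
  | zero =>
    intro s m hd hsm hm hge hlt
    have hsm' : s = m := by omega
    subst hsm'
    rw [List.drop_eq_getElem_cons hm]
    have h1 : prices[s] < p := by
      rw [List.getElem?_eq_getElem hm] at hlt; simpa using hlt
    simp only [altCount, if_pos h1]
    omega
  | succ d ih =>
    intro s m hd hsm hm hge hlt
    have hs : s < m := by omega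
    have hsl : s < prices.length := by omega
    rw [List.drop_eq_getElem_cons hsl]
    have hps : p ≤ prices[s] := by
      have := hge s le_rfl hs
      rw [List.getElem?_eq_getElem hsl] at this; simpa using this
    simp only [altCount, if_neg (by omega : ¬ prices[s] < p)]
    rw [ih (s + 1) m (by omega) (by omega) hm (fun j hj hj' => hge j (by omega) hj') hlt]
    omega

lemma foldl_set_getElem? (f : Nat → Int) :
    ∀ (l : List Nat) (ans : List Int) (m : Nat),
      (l.foldl (fun a k => a.set k (f k)) ans)[m]? =
        if m ∈ l then (if m < ans.length then some (f m) else none) else ans[m]? := by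
  intro l
  induction l with
  | nil => intro ans m; simp
  | cons k rest ih =>
    intro ans m
    rw [List.foldl_cons, ih]
    by_cases hm : m ∈ rest
    · simp [hm, List.mem_cons]
    · by_cases hmk : m = k
      · subst hmk
        simp [hm, List.getElem?_set]
      · simp [hm, hmk, Ne.symm hmk]

lemma cstack_pairwise (prices : List Int) (i : Nat) :
    (cstack prices i).Pairwise (fun a b => prices[b]?.getD 0 ≤ prices[a]?.getD 0) := by
  unfold cstack
  rw [List.pairwise_reverse]
  have h1 : ((List.range i).filter (gud prices i)).Pairwise (· < ·) :=
    (List.pairwise_lt_range).filter _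
  refine h1.imp_of_mem ?_
  intro a b ha hb hab
  rw [List.mem_filter, List.mem_range] at ha hb
  have := (by simpa [gud] using ha.2 : ∀ j < i, a < j → prices[a]?.getD 0 ≤ prices[j]?.getD 0)
  exact this b hb.1 hab

lemma pop_eq (prices : List Int) (i : Nat) :
    ∀ (s : List Nat) (ans : List Int),
      s.Pairwise (fun a b => prices[b]?.getD 0 ≤ prices[a]?.getD 0) →
      solutionPop prices (i : Int) (s.map (fun k : Nat => (k : Int))) ans =
        ((s.filter (fun k => decide (prices[k]?.getD 0 ≤ prices[i]?.getD 0))).map (fun k : Nat => (k : Int)),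
         (s.filter (fun k => decide (prices[i]?.getD 0 < prices[k]?.getD 0))).foldl
           (fun a k => a.set k ((i : Int) - (k : Int))) ans) := by
  intro s
  induction s with
  | nil => intro ans _; simp [solutionPop]
  | cons k rest ih =>
    intro ans hpair
    rw [List.pairwise_cons] at hpair
    by_cases hk : prices[i]?.getD 0 < prices[k]?.getD 0
    · have hcond : PySem.List.pyGetD prices (k : Int) 0 > PySem.List.pyGetD prices (i : Int) 0 := by
        simpa using hk
      simp only [List.map_cons, solutionPop, if_pos hcond]
      rw [PySem.List.pySetD_natCast]
      rw [ih (ans.set k ((i:Int) - k)) hpair.2]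
      have hA : ¬ prices[k]?.getD 0 ≤ prices[i]?.getD 0 := by omega
      simp [hA, hk]
    · have hcond : ¬ PySem.List.pyGetD prices (k : Int) 0 > PySem.List.pyGetD prices (i : Int) 0 := by
        simpa using hk
      simp only [List.map_cons, solutionPop, if_neg hcond]
      have hrest_le : ∀ r ∈ rest, prices[r]?.getD 0 ≤ prices[i]?.getD 0 :=
        fun r hr => le_trans (hpair.1 r hr) (by omega)
      rw [List.filter_cons_of_pos (by simpa using (by omega : prices[k]?.getD 0 ≤ prices[i]?.getD 0)),
          List.filter_cons_of_neg (by simpa using hk)]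
      rw [List.filter_eq_self.mpr (fun r hr => by simpa using hrest_le r hr),
          List.filter_eq_nil_iff.mpr (fun r hr => by simpa using not_lt.mpr (hrest_le r hr))]
      simp

lemma cstack_succ (prices : List Int) (i : Nat) :
    cstack prices (i + 1) =
      i :: ((List.range i).filter (gud prices (i + 1))).reverse := by
  unfold cstack
  rw [List.range_succ, List.filter_append, List.reverse_append]
  simp [gud_of_le prices (by omega : i + 1 ≤ i + 1)]

lemma cstack_step (prices : List Int) (i : Nat) :
    (cstack prices i).filter (fun k => decide (prices[k]?.getD 0 ≤ prices[i]?.getD 0)) =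
      ((List.range i).filter (gud prices (i + 1))).reverse := by
  unfold cstack
  rw [List.filter_reverse, List.filter_filter]
  congr 1
  apply List.filter_congr
  intro k hk
  rw [List.mem_range] at hk
  rcases hg : gud prices i k
  · have h1 : gud prices (i + 1) k = false := by
      rcases h : gud prices (i + 1) k
      · rfl
      · exact absurd ((gud_succ_iff prices i k).mp h).1 (by simp [hg])
    simp [h1]
  · by_cases hle : prices[k]?.getD 0 ≤ prices[i]?.getD 0
    · have h1 : gud prices (i + 1) k = true := (gud_succ_iff prices i k).mpr ⟨hg, fun _ => hle⟩
      simp [h1, hle]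
    · have h1 : gud prices (i + 1) k = false := by
        rcases h : gud prices (i + 1) k
        · rfl
        · exact absurd (((gud_succ_iff prices i k).mp h).2 hk) hle
      simp [h1, hle]

lemma mem_popped (prices : List Int) (i k : Nat) :
    k ∈ (cstack prices i).filter (fun k => decide (prices[i]?.getD 0 < prices[k]?.getD 0)) ↔
      k < i ∧ gud prices i k = true ∧ prices[i]?.getD 0 < prices[k]?.getD 0 := by
  unfold cstack
  simp only [List.filter_reverse, List.mem_reverse, List.mem_filter, List.mem_range,
    decide_eq_true_eq]
  tauto

lemma cans_length (prices : List Int) (i : Nat) : (cans prices i).length = prices.length := by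
  simp [cans]

lemma cans_getElem? (prices : List Int) (i k : Nat) (hk : k < prices.length) :
    (cans prices i)[k]? =
      some (if gud prices i k then (prices.length : Int) - 1 - k else tgt prices k) := by
  unfold cans
  rw [List.getElem?_map, List.getElem?_range hk]
  rfl

lemma ans_step (prices : List Int) (i : Nat) (hi : i < prices.length) :
    ((cstack prices i).filter (fun k => decide (prices[i]?.getD 0 < prices[k]?.getD 0))).foldl
        (fun a k => a.set k ((i : Int) - (k : Int))) (cans prices i) =
      cans prices (i + 1) := by
  apply List.ext_getElem?
  intro m
  rw [foldl_set_getElem? (fun k : Nat => (i : Int) - (k : Int))]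
  by_cases hmem : m ∈ (cstack prices i).filter (fun k => decide (prices[i]?.getD 0 < prices[k]?.getD 0))
  · rw [mem_popped] at hmem
    obtain ⟨hmi, hgud, hlt⟩ := hmem
    have hm : m < prices.length := by omega
    rw [if_pos (by rw [mem_popped]; exact ⟨hmi, hgud, hlt⟩), if_pos (by rw [cans_length]; exact hm)]
    rw [cans_getElem? prices (i+1) m hm]
    have hng : gud prices (i + 1) m = false := by
      rcases h : gud prices (i + 1) m
      · rfl
      · have := (gud_succ_iff prices i m).mp h
        exact absurd (this.2 hmi) (by omega)
    rw [hng]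
    simp only [if_neg (by simp : ¬ (false = true))]
    have : tgt prices m = (i : Int) - m := by
      unfold tgt
      rw [altCount_drop_first prices (prices[m]?.getD 0) (i - (m+1)) (m+1) i rfl (by omega) hi
        (fun j hj hj' => by
          have := (by simpa [gud] using hgud : ∀ j < i, m < j → prices[m]?.getD 0 ≤ prices[j]?.getD 0)
          exact this j hj' (by omega)) hlt]
      push_cast; ring
    rw [this]
  · rw [if_neg hmem]
    by_cases hm : m < prices.length
    · rw [cans_getElem? prices i m hm, cans_getElem? prices (i+1) m hm]
      congr 1
      by_cases hmi : m < i
      · rcases hg : gud prices i m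
        · have : gud prices (i + 1) m = false := by
            rcases h : gud prices (i + 1) m
            · rfl
            · exact absurd ((gud_succ_iff prices i m).mp h).1 (by simp [hg])
          rw [this]
        · have : gud prices (i + 1) m = true := by
            rw [gud_succ_iff]
            refine ⟨hg, fun _ => ?_⟩
            by_contra hle
            exact hmem ((mem_popped prices i m).mpr ⟨hmi, hg, by omega⟩)
          rw [this]
      · rw [gud_of_le prices (by omega : i ≤ m + 1), gud_of_le prices (by omega : i + 1 ≤ m + 1)]
    · have h1 : (cans prices i)[m]? = none := by
        rw [List.getElem?_eq_none]; rw [cans_length]; omega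
      have h2 : (cans prices (i+1))[m]? = none := by
        rw [List.getElem?_eq_none]; rw [cans_length]; omega
      rw [h1, h2]

lemma fold_inv (prices : List Int) :
    ∀ i, i ≤ prices.length →
      (((List.range i).map (fun k : Nat => (k : Int))).foldl
          (fun (st : List Int × List Int) (j : Int) =>
            let r := solutionPop prices j st.1 st.2
            (j :: r.1, r.2))
          (([] : List Int), cans prices 0)) =
        ((cstack prices i).map (fun k : Nat => (k : Int)), cans prices i) := by
  intro i
  induction i with
  | zero => intro _; simp [cstack]
  | succ i ih =>
    intro hi
    rw [List.range_succ, List.map_append, List.foldl_append, ih (by omega)]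
    simp only [List.map_cons, List.map_nil, List.foldl_cons, List.foldl_nil]
    rw [pop_eq prices i (cstack prices i) (cans prices i) (cstack_pairwise prices i)]
    simp only
    rw [cstack_step, ans_step prices i (by omega), cstack_succ]
    simp

lemma init_answer (prices : List Int) :
    PySem.List.pyRange ((prices.length : Int) - 1) (-1) (-1) = cans prices 0 := by
  have h0 : cans prices 0 =
      (List.range prices.length).map (fun k : Nat => (prices.length : Int) - 1 - (k : Int)) := by
    unfold cans
    apply List.map_congr_left
    intro k hk
    rw [gud_of_le prices (by omega : 0 ≤ k + 1)]
    simp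
  rw [h0]
  unfold PySem.List.pyRange
  rw [if_neg (by norm_num)]
  cases hn : prices.length with
  | zero => simp
  | succ n =>
    rw [if_neg (by norm_num), if_pos (by push_cast; omega)]
    have hc : (((((n + 1 : Nat)) : Int) - 1 - -1 + - -1 - 1) / - -1).toNat = n + 1 := by
      push_cast; omega
    show List.map _ (List.range (((((n + 1 : Nat)) : Int) - 1 - -1 + - -1 - 1) / - -1).toNat) = _
    rw [hc]
    apply List.map_congr_left
    intro k hk
    push_cast
    ring

lemma tgt_cons_succ (p : Int) (rest : List Int) (k : Nat) :
    tgt (p :: rest) (k + 1) = tgt rest k := by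
  unfold tgt
  rfl

lemma alt_eq_map_tgt (prices : List Int) :
    solution_alt prices = (List.range prices.length).map (tgt prices) := by
  induction prices with
  | nil => rfl
  | cons p rest ih =>
    show altCount p rest :: solution_alt rest = _
    rw [List.length_cons, List.range_succ_eq_map, List.map_cons, List.map_map]
    have h2 : (List.range rest.length).map (tgt (p :: rest) ∘ Nat.succ) =
        (List.range rest.length).map (tgt rest) :=
      List.map_congr_left (fun k _ => tgt_cons_succ p rest k)
    rw [h2, ← ih]
    rfl

lemma cans_final (prices : List Int) :
    cans prices prices.length = solution_alt prices := by
  rw [alt_eq_map_tgt]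
  unfold cans
  apply List.map_congr_left
  intro k hk
  rw [List.mem_range] at hk
  rcases hg : gud prices prices.length k
  · simp
  · rw [if_pos rfl]
    unfold tgt
    rw [altCount_drop_all prices (prices[k]?.getD 0) (k + 1)
      (fun j hj hj' => by
        have := (by simpa [gud] using hg :
          ∀ j < prices.length, k < j → prices[k]?.getD 0 ≤ prices[j]?.getD 0)
        exact this j hj' (by omega))]
    push_cast [Nat.cast_sub (by omega : k + 1 ≤ prices.length)]
    ring

-- ===== VERDICT (by name: the statement is the Claim_ definition above) =====
theorem solution_spec : Claim_equal_solution := by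
  intro prices _
  show solution prices = solution_alt prices
  unfold solution
  rw [PySem.List.len_eq, PySem.List.pyRange_zero_natCast, init_answer]
  exact (congrArg Prod.snd (fold_inv prices prices.length le_rfl)).trans (cans_final prices)
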